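-- pv_equiv track=rewrite | github.com/RoniAUB/Oud_LM | Tokenization.py | build_token_sequences
-- ===== SOURCE A (Python) =====
-- def build_token_sequences(type_tokens, freq_tokens, dur_tokens, target_length=None, pad_token=0):
--     """
--     Builds token sequences from type, frequency, and duration tokens.
--     Splits sequences longer than target_length and pads shorter ones.
--
--     Args:
--         type_tokens (List[int]): List of type tokens (1D).
--         freq_tokens (List[List[int]]): List of frequency token lists.
--         dur_tokens (List[List[int]]): List of duration token lists.
--         target_length (int, optional): Maximum length for each sequence.
--         pad_token (int, optional): Padding token value.
--
--     Returns:
--         List[List[int]]: List of token sequences.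
--     """
--     assert len(type_tokens) == len(freq_tokens) == len(dur_tokens), "Input lists must have the same length"
--     token_sequences = []
--
--     for t, freqs, durs in zip(type_tokens, freq_tokens, dur_tokens):
--         assert len(freqs) == len(durs), "Frequency and duration lists must be same length"
--
--         # Number of tokens each (freq, dur) pair takes
--         pair_token_count = 2
--         max_pairs_per_seq = None
--         if target_length is not None:
--             assert target_length >= 1 + pair_token_count, "Target length too small to hold even one pair"
--             max_pairs_per_seq = (target_length - 1) // pair_token_count
--
--         i = 0
--         while i < len(freqs):
--             seq = [t]
--             end = i + max_pairs_per_seq if max_pairs_per_seq else len(freqs)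
--             for f, d in zip(freqs[i:end], durs[i:end]):
--                 seq.extend([f, d])
--             i = end
--
--             # Pad if needed
--             if target_length is not None and len(seq) < target_length:
--                 seq += [pad_token] * (target_length - len(seq))
--
--             token_sequences.append(seq)
--
--     return token_sequences
-- ===== SOURCE B (Python) =====
-- def build_token_sequences(type_tokens, freq_tokens, dur_tokens, target_length=None, pad_token=0):
--     """Same result as A, by a different decomposition: flatten each row's
--     (freq, dur) pairs into one interleaved list, then chunk it by slicing
--     at a fixed stride and pad each chunk up to target_length."""
--     assert len(type_tokens) == len(freq_tokens) == len(dur_tokens), "Input lists must have the same length"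
--     out = []
--     for t, freqs, durs in zip(type_tokens, freq_tokens, dur_tokens):
--         assert len(freqs) == len(durs), "Frequency and duration lists must be same length"
--         pairs = [x for fd in zip(freqs, durs) for x in fd]
--         if target_length is None:
--             if pairs:
--                 out.append([t] + pairs)
--         else:
--             assert target_length >= 3, "Target length too small to hold even one pair"
--             step = 2 * ((target_length - 1) // 2)
--             for start in range(0, len(pairs), step):
--                 chunk = [t] + pairs[start:start + step]
--                 out.append(chunk + [pad_token] * (target_length - len(chunk)))
--     return out
-- ===== Notes on version B (the rewrite author's own statement) =====
-- stated objective: alternative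
-- what changed: B replaces A's index-advancing while loop (which re-slices and re-zips the freq and dur lists for every chunk) by first building one flat interleaved pairs list per row and then chunking it with a single stride-step range pass with padding folded into every chunk unconditionally.
import Mathlib
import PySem

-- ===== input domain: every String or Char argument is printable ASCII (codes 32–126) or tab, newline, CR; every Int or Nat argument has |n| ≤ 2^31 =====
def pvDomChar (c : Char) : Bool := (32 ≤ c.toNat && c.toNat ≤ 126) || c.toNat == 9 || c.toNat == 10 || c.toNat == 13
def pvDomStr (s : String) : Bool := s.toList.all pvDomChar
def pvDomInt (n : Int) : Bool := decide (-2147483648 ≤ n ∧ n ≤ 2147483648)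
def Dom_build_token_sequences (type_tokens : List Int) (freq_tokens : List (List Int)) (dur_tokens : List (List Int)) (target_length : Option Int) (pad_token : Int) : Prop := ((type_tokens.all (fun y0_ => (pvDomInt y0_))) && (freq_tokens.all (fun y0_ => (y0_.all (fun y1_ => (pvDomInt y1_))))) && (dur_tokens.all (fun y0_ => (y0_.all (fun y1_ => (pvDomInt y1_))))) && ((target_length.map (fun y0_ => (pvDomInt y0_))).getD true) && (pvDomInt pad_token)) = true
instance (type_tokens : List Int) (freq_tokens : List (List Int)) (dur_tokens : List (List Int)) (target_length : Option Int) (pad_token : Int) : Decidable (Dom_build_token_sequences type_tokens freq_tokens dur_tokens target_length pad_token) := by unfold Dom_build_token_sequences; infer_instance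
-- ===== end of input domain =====

-- B flattens each row's (freq, dur) pairs into one interleaved list and chunks it by
-- slicing at a fixed stride over range(0, len(pairs), step), instead of A's
-- index-advancing while loop that re-zips a slice of each of the two lists per chunk;
-- same return value on Pre_ (objective: alternative decomposition).
-- B rebuilds each row's output by first flattening the (freq, dur) pairs into one
-- interleaved list and then chunking that list by slicing at a fixed stride
-- (a range-over-starts pass), instead of A's index-advancing while loop that
-- re-zips a slice of each of the two lists per chunk; same return value, stated below.


-- ===== PORT A =====
-- A's inner 'while i < len(freqs)' loop: fuel-bounded recursion (fuel = len(freqs)+1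
-- suffices inside Pre_, where each iteration advances i by at least 1).
def rowLoopA (t : Int) (freqs durs : List Int) (mp : Option Int) (target_length : Option Int) (pad_token : Int) : Nat → Int → List (List Int) → List (List Int)
  | 0, _, acc => acc
  | Nat.succ fuel, i, acc =>
    if i < (freqs.length : Int) then
      -- end = i + max_pairs_per_seq if max_pairs_per_seq else len(freqs)  (Python truthiness)
      let e : Int := match mp with
        | some m => if m ≠ 0 then i + m else (freqs.length : Int)
        | none => (freqs.length : Int)
      -- seq = [t]; for f, d in zip(freqs[i:end], durs[i:end]): seq.extend([f, d])
      let seq := ((PySem.List.slice freqs (some i) (some e)).zip (PySem.List.slice durs (some i) (some e))).foldl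
        (fun s fd => s ++ [fd.1, fd.2]) [t]
      -- pad if needed
      let seq := match target_length with
        | some tl => if (seq.length : Int) < tl then seq ++ List.replicate (tl - (seq.length : Int)).toNat pad_token else seq
        | none => seq
      rowLoopA t freqs durs mp target_length pad_token fuel e (acc ++ [seq])
    else acc

def build_token_sequences (type_tokens : List Int) (freq_tokens : List (List Int)) (dur_tokens : List (List Int)) (target_length : Option Int) (pad_token : Int) : List (List Int) :=
  (type_tokens.zip (freq_tokens.zip dur_tokens)).foldl
    (fun acc tr =>
      -- max_pairs_per_seq = (target_length - 1) // 2 (pair_token_count = 2)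
      let mp := target_length.map (fun n => PySem.Int.floordiv (n - 1) 2)
      rowLoopA tr.1 tr.2.1 tr.2.2 mp target_length pad_token (tr.2.1.length + 1) 0 acc)
    []

-- ===== PORT B =====
-- one row of B: pairs = interleaved flat list, then either one whole sequence
-- (no target_length) or a fold over range(0, len(pairs), step) slicing chunks.
def altRow (t : Int) (freqs durs : List Int) (target_length : Option Int) (pad_token : Int) (out : List (List Int)) : List (List Int) :=
  let pairs := (freqs.zip durs).flatMap (fun fd => [fd.1, fd.2])
  match target_length with
  | none => if pairs.isEmpty then out else out ++ [t :: pairs]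
  | some tl =>
    let step := 2 * PySem.Int.floordiv (tl - 1) 2
    (PySem.List.pyRange 0 (pairs.length : Int) step).foldl
      (fun out start =>
        let chunk := t :: PySem.List.slice pairs (some start) (some (start + step))
        out ++ [chunk ++ List.replicate (tl - (chunk.length : Int)).toNat pad_token])
      out

def build_token_sequences_alt (type_tokens : List Int) (freq_tokens : List (List Int)) (dur_tokens : List (List Int)) (target_length : Option Int) (pad_token : Int) : List (List Int) :=
  (type_tokens.zip (freq_tokens.zip dur_tokens)).foldl
    (fun out tr => altRow tr.1 tr.2.1 tr.2.2 target_length pad_token out)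
    []

-- ===== PRECONDITION & SPEC =====
-- Pre_ excludes exactly the inputs on which A's asserts raise AssertionError:
-- unequal top-level lengths, a row whose freq and dur lists differ in length,
-- and a given target_length < 3 when at least one row exists.
def Pre_build_token_sequences (type_tokens : List Int) (freq_tokens : List (List Int)) (dur_tokens : List (List Int)) (target_length : Option Int) (pad_token : Int) : Prop :=
  type_tokens.length = freq_tokens.length ∧ freq_tokens.length = dur_tokens.length ∧
  (∀ p ∈ freq_tokens.zip dur_tokens, p.1.length = p.2.length) ∧
  (type_tokens ≠ [] → ∀ n, target_length = some n → 3 ≤ n)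
instance (type_tokens : List Int) (freq_tokens : List (List Int)) (dur_tokens : List (List Int)) (target_length : Option Int) (pad_token : Int) : Decidable (Pre_build_token_sequences type_tokens freq_tokens dur_tokens target_length pad_token) := by unfold Pre_build_token_sequences; infer_instance

def pvWitness_build_token_sequences : List Int × List (List Int) × List (List Int) × Option Int × Int :=
  ([1, 2], [[1], [2, 3]], [[4], [5, 6]], some 4, 0)

def Spec_build_token_sequences (type_tokens : List Int) (freq_tokens : List (List Int)) (dur_tokens : List (List Int)) (target_length : Option Int) (pad_token : Int) (out : List (List Int)) : Prop := out = build_token_sequences_alt type_tokens freq_tokens dur_tokens target_length pad_token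
instance (type_tokens : List Int) (freq_tokens : List (List Int)) (dur_tokens : List (List Int)) (target_length : Option Int) (pad_token : Int) (out : List (List Int)) : Decidable (Spec_build_token_sequences type_tokens freq_tokens dur_tokens target_length pad_token out) := by unfold Spec_build_token_sequences; infer_instance

-- ===== CLAIM (what is proved, stated in full; the proofs are below) =====
def Claim_equal_build_token_sequences : Prop := ∀ (type_tokens : List Int) (freq_tokens : List (List Int)) (dur_tokens : List (List Int)) (target_length : Option Int) (pad_token : Int), Dom_build_token_sequences type_tokens freq_tokens dur_tokens target_length pad_token → Pre_build_token_sequences type_tokens freq_tokens dur_tokens target_length pad_token → Spec_build_token_sequences type_tokens freq_tokens dur_tokens target_length pad_token (build_token_sequences type_tokens freq_tokens dur_tokens target_length pad_token)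


-- ===== LEMMAS AND PROOFS =====

-- canonical chunker both row loops are reduced to: split the flat interleaved
-- list into chunks of (c+1) elements, prefix t, pad up to tl.
def pvPad1 (tl pad : Int) (s : List Int) : List Int :=
  s ++ List.replicate (tl - (s.length : Int)).toNat pad

def chunksC (t tl pad : Int) (c : Nat) : List Int → List (List Int)
  | [] => []
  | x :: r => pvPad1 tl pad (t :: x :: r.take c) :: chunksC t tl pad c (r.drop c)
  termination_by l => l.length
  decreasing_by simp

theorem zip_take_take {α β : Type} (l : List α) (l' : List β) (n : Nat) :
    (l.take n).zip (l'.take n) = (l.zip l').take n := by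
  induction l generalizing l' n with
  | nil => simp
  | cons a as ih =>
    cases l' with
    | nil => simp
    | cons b bs => cases n with
      | zero => simp
      | succ n => simp [ih bs n]

theorem zip_drop_drop {α β : Type} (l : List α) (l' : List β) (n : Nat) :
    (l.drop n).zip (l'.drop n) = (l.zip l').drop n := by
  induction l generalizing l' n with
  | nil => simp
  | cons a as ih =>
    cases l' with
    | nil => simp
    | cons b bs => cases n with
      | zero => simp
      | succ n => simp [ih bs n]

theorem pyRange_pos_nil {a b s : Int} (hs : 0 < s) (hab : ¬ a < b) :
    PySem.List.pyRange a b s = [] := by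
  rw [PySem.List.pyRange_of_pos _ _ hs]; simp [hab]

theorem flatMap_take2 {α : Type} (g : α → α → List Int) (hg : ∀ a b, (g a b).length = 2)
    (l : List (α × α)) (m : Nat) :
    (l.take m).flatMap (fun p => g p.1 p.2) = ((l.flatMap (fun p => g p.1 p.2)).take (2 * m)) := by
  induction l generalizing m with
  | nil => simp
  | cons p r ih =>
    cases m with
    | zero => simp
    | succ m =>
      have hgl := hg p.1 p.2
      simp only [List.take_succ_cons, List.flatMap_cons, ih m, List.take_append, hgl]
      rw [List.take_of_length_le (l := g p.1 p.2) (by omega), show 2 * (m + 1) - 2 = 2 * m from by omega]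

theorem flatMap_drop2 {α : Type} (g : α → α → List Int) (hg : ∀ a b, (g a b).length = 2)
    (l : List (α × α)) (m : Nat) :
    (l.drop m).flatMap (fun p => g p.1 p.2) = ((l.flatMap (fun p => g p.1 p.2)).drop (2 * m)) := by
  induction l generalizing m with
  | nil => simp
  | cons p r ih =>
    cases m with
    | zero => simp
    | succ m =>
      have hgl := hg p.1 p.2
      simp only [List.drop_succ_cons, List.flatMap_cons, ih m, List.drop_append, hgl]
      rw [List.drop_of_length_le (l := g p.1 p.2) (by omega), show 2 * (m + 1) - 2 = 2 * m from by omega]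
      simp

theorem pyRange_pos_cons {a b s : Int} (hs : 0 < s) (hab : a < b) :
    PySem.List.pyRange a b s = a :: PySem.List.pyRange (a + s) b s := by
  rw [PySem.List.pyRange_of_pos _ _ hs, PySem.List.pyRange_of_pos _ _ hs, if_pos hab]
  have key : (b - a + s - 1) / s = (b - a - 1) / s + 1 := by
    have := Int.add_mul_ediv_right (b - a - 1) 1 (ne_of_gt hs)
    rw [← this]; ring_nf
  have hnn : 0 ≤ (b - a - 1) / s := Int.ediv_nonneg (by omega) (by omega)
  by_cases h2 : a + s < b
  · rw [if_pos h2]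
    have : ((b - a + s - 1) / s).toNat = ((b - (a + s) + s - 1) / s).toNat + 1 := by
      have e : b - (a + s) + s - 1 = b - a - 1 := by ring
      rw [e, key]; omega
    rw [this, List.range_succ_eq_map]
    simp only [List.map_cons, List.map_map, Nat.cast_zero, mul_zero, add_zero]
    congr 1
    apply List.map_congr_left
    intro k _
    simp only [Function.comp_apply, Nat.succ_eq_add_one]
    push_cast
    ring
  · rw [if_neg h2]
    have z : (b - a - 1) / s = 0 := Int.ediv_eq_zero_of_lt (by omega) (by omega)
    have : ((b - a + s - 1) / s).toNat = 1 := by rw [key, z]; rfl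
    rw [this]
    simp

theorem shiftA (t : Int) (m : Nat) (hm : 1 ≤ m) (tlo : Option Int) (pad : Int) :
    ∀ (fuel : Nat) (fs ds : List Int) (i : Nat) (acc : List (List Int)),
    rowLoopA t fs ds (some (m : Int)) tlo pad fuel (i : Int) acc
      = rowLoopA t (fs.drop i) (ds.drop i) (some (m : Int)) tlo pad fuel 0 acc := by
  intro fuel
  induction fuel with
  | zero => intro fs ds i acc; rfl
  | succ fuel ih =>
    intro fs ds i acc
    simp only [rowLoopA]
    by_cases h : i < fs.length
    · rw [if_pos (show ((i:Nat):Int) < (fs.length:Int) by exact_mod_cast h)]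
      rw [if_pos (show (m:Int) ≠ 0 by exact_mod_cast Nat.one_le_iff_ne_zero.mp hm)]
      rw [if_pos (show (0:Int) < ((fs.drop i).length:Int) by simp; push_cast; omega)]
      rw [if_pos (show (m:Int) ≠ 0 by exact_mod_cast Nat.one_le_iff_ne_zero.mp hm)]
      have e1 : PySem.List.slice fs (some (i:Int)) (some ((i:Int) + (m:Int))) = (fs.drop i).take m := by
        rw [show ((i:Int) + (m:Int)) = ((i + m : Nat) : Int) from by push_cast; ring]
        rw [PySem.List.slice_natCast]
        congr 1; omega
      have e2 : PySem.List.slice ds (some (i:Int)) (some ((i:Int) + (m:Int))) = (ds.drop i).take m := by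
        rw [show ((i:Int) + (m:Int)) = ((i + m : Nat) : Int) from by push_cast; ring]
        rw [PySem.List.slice_natCast]
        congr 1; omega
      have e3 : PySem.List.slice (fs.drop i) (some (0:Int)) (some ((0:Int) + (m:Int))) = (fs.drop i).take m := by
        rw [show ((0:Int) + (m:Int)) = ((m : Nat) : Int) from by push_cast; ring,
            show (0:Int) = ((0 : Nat) : Int) from rfl]
        rw [PySem.List.slice_natCast]
        simp
      have e4 : PySem.List.slice (ds.drop i) (some (0:Int)) (some ((0:Int) + (m:Int))) = (ds.drop i).take m := by
        rw [show ((0:Int) + (m:Int)) = ((m : Nat) : Int) from by push_cast; ring,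
            show (0:Int) = ((0 : Nat) : Int) from rfl]
        rw [PySem.List.slice_natCast]
        simp
      rw [e1, e2, e3, e4]
      rw [show (i:Int) + (m:Int) = ((i + m : Nat) : Int) from by push_cast; ring]
      rw [show (0:Int) + (m:Int) = ((m : Nat) : Int) from by push_cast; ring]
      rw [ih fs ds (i + m), ih (fs.drop i) (ds.drop i) m]
      rw [List.drop_drop, List.drop_drop]

    · rw [if_neg (show ¬ ((i:Nat):Int) < (fs.length:Int) by exact_mod_cast h)]
      rw [if_neg (show ¬ (0:Int) < ((fs.drop i).length:Int) by simp; push_cast; omega)]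

theorem pad_eq_pvPad1 (n pad : Int) (s : List Int) :
    (if (s.length : Int) < n then s ++ List.replicate (n - (s.length : Int)).toNat pad else s)
      = pvPad1 n pad s := by
  unfold pvPad1
  split_ifs with h
  · rfl
  · rw [show (n - (s.length : Int)).toNat = 0 from by omega]
    simp

theorem lemA (t n pad : Int) (m : Nat) (hm : 1 ≤ m) :
    ∀ (fuel : Nat) (fs ds : List Int) (acc : List (List Int)),
    ds.length = fs.length → fs.length < fuel →
    rowLoopA t fs ds (some (m : Int)) (some n) pad fuel 0 acc
      = acc ++ chunksC t n pad (2 * m - 1) ((fs.zip ds).flatMap (fun fd => [fd.1, fd.2])) := by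
  intro fuel
  induction fuel with
  | zero => intro fs ds acc h1 h2; omega
  | succ fuel ih =>
    intro fs ds acc h1 h2
    cases fs with
    | nil =>
      cases ds with
      | nil => simp [rowLoopA, chunksC]
      | cons d ds' => simp at h1
    | cons f fs' =>
      cases ds with
      | nil => simp at h1
      | cons d ds' =>
        simp only [rowLoopA]
        rw [if_pos (show (0:Int) < (((f :: fs').length : Nat) : Int) by exact_mod_cast Nat.succ_pos fs'.length)]
        rw [if_pos (show (m:Int) ≠ 0 by exact_mod_cast Nat.one_le_iff_ne_zero.mp hm)]
        have e3 : ∀ (l : List Int), PySem.List.slice l (some (0:Int)) (some ((0:Int) + (m:Int))) = l.take m := by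
          intro l
          rw [show ((0:Int) + (m:Int)) = ((m : Nat) : Int) from by push_cast; ring,
              show (0:Int) = ((0 : Nat) : Int) from rfl]
          rw [PySem.List.slice_natCast]
          simp
        rw [e3, e3]
        rw [PySem.List.foldl_append_eq_flatMap (fun (fd : Int × Int) => [fd.1, fd.2])]
        rw [pad_eq_pvPad1]
        rw [show (0:Int) + (m:Int) = (((m : Nat) : Nat) : Int) from by push_cast; ring]
        rw [shiftA t m hm (some n) pad fuel (f :: fs') (d :: ds') m]
        rw [ih ((f :: fs').drop m) ((d :: ds').drop m) _ (by simp at h1 ⊢; omega) (by simp at h2 ⊢; omega)]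
        rw [zip_take_take, zip_drop_drop]
        rw [flatMap_take2 (fun a b => [a, b]) (fun _ _ => rfl),
            flatMap_drop2 (fun a b => [a, b]) (fun _ _ => rfl)]
        have hL : ((f :: fs').zip (d :: ds')).flatMap (fun fd => [fd.1, fd.2])
            = f :: d :: ((fs'.zip ds').flatMap (fun fd => [fd.1, fd.2])) := by
          simp
        rw [hL]
        rw [show chunksC t n pad (2 * m - 1) (f :: d :: ((fs'.zip ds').flatMap (fun fd => [fd.1, fd.2])))
            = pvPad1 n pad (t :: f :: (d :: (fs'.zip ds').flatMap (fun fd => [fd.1, fd.2])).take (2 * m - 1))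
              :: chunksC t n pad (2 * m - 1) ((d :: (fs'.zip ds').flatMap (fun fd => [fd.1, fd.2])).drop (2 * m - 1)) from by rw [chunksC]]
        rw [show (2 : Nat) * m = (2 * m - 1) + 1 from by omega]
        simp only [List.take_succ_cons, List.drop_succ_cons]
        simp

theorem lemB (t n pad : Int) (s' : Nat) (hs : 1 ≤ s') (pairs : List Int) :
    ∀ (k a : Nat) (acc : List (List Int)), pairs.length - a ≤ k →
    (PySem.List.pyRange (a : Int) (pairs.length : Int) (s' : Int)).foldl
      (fun out start =>
        out ++ [(t :: PySem.List.slice pairs (some start) (some (start + (s' : Int)))) ++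
          List.replicate (n - (((t : Int) :: PySem.List.slice pairs (some start) (some (start + (s' : Int)))).length : Int)).toNat pad])
      acc
      = acc ++ chunksC t n pad (s' - 1) (pairs.drop a) := by
  intro k
  induction k with
  | zero =>
    intro a acc hk
    rw [pyRange_pos_nil (by exact_mod_cast hs) (by push_cast; omega)]
    rw [List.drop_of_length_le (by omega)]
    simp [chunksC]
  | succ k ihk =>
    intro a acc hk
    by_cases h : a < pairs.length
    · rw [pyRange_pos_cons (by exact_mod_cast hs) (by exact_mod_cast h)]
      simp only [List.foldl_cons]
      rw [show ((a:Int) + (s':Int)) = ((a + s' : Nat) : Int) from by push_cast; ring]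
      rw [ihk (a + s') _ (by omega)]
      have hsl : PySem.List.slice pairs (some ((a:Nat):Int)) (some ((a + s' : Nat) : Int))
          = (pairs.drop a).take s' := by
        rw [PySem.List.slice_natCast]
        congr 1; omega
      rw [hsl]
      have hd : pairs.drop a = pairs[a] :: pairs.drop (a + 1) := List.drop_eq_getElem_cons h
      rw [hd]
      rw [show chunksC t n pad (s' - 1) (pairs[a] :: pairs.drop (a + 1))
          = pvPad1 n pad (t :: pairs[a] :: (pairs.drop (a + 1)).take (s' - 1))
            :: chunksC t n pad (s' - 1) ((pairs.drop (a + 1)).drop (s' - 1)) from by rw [chunksC]]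
      rw [show s' = (s' - 1) + 1 from by omega]
      simp only [List.take_succ_cons, List.drop_succ_cons]
      rw [List.drop_drop]
      rw [show (a + ((s' - 1) + 1)) = ((s' - 1) + (a + 1)) from by omega]
      simp only [pvPad1]
      rw [show ((s' - 1) + (a + 1)) = ((a + 1) + (s' - 1)) from by omega]
      simp
    · rw [pyRange_pos_nil (by exact_mod_cast hs) (by push_cast; omega)]
      rw [List.drop_of_length_le (by omega)]
      simp [chunksC]

theorem row_eq (t : Int) (fs ds : List Int) (tlo : Option Int) (pad : Int) (acc : List (List Int))
    (hlen : ds.length = fs.length) (htl : ∀ n, tlo = some n → 3 ≤ n) :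
    rowLoopA t fs ds (tlo.map (fun n => PySem.Int.floordiv (n - 1) 2)) tlo pad (fs.length + 1) 0 acc
      = altRow t fs ds tlo pad acc := by
  cases tlo with
  | none =>
    cases fs with
    | nil =>
      cases ds with
      | nil => simp [rowLoopA, altRow]
      | cons d ds' => simp at hlen
    | cons f fs' =>
      cases ds with
      | nil => simp at hlen
      | cons d ds' =>
        simp only [Option.map_none, rowLoopA]
        rw [if_pos (show (0:Int) < (((f :: fs').length : Nat) : Int) by exact_mod_cast Nat.succ_pos fs'.length)]
        have esl : ∀ (l : List Int), l.length = (f :: fs').length →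
            PySem.List.slice l (some (0:Int)) (some (((f :: fs').length : Nat) : Int)) = l := by
          intro l hl
          rw [show (0:Int) = ((0 : Nat) : Int) from rfl, PySem.List.slice_natCast]
          simp [hl]
        rw [esl (f :: fs') rfl, esl (d :: ds') hlen]
        rw [PySem.List.foldl_append_eq_flatMap (fun (fd : Int × Int) => [fd.1, fd.2])]
        simp only [List.length_cons, rowLoopA]
        rw [if_neg (show ¬ ((fs'.length + 1 : Nat) : Int) < ((fs'.length + 1 : Nat) : Int) by omega)]
        simp only [altRow, List.zip_cons_cons, List.flatMap_cons, List.isEmpty_cons]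
        simp
  | some n =>
    have hn : 3 ≤ n := htl n rfl
    have hm1 : (1:Int) ≤ PySem.Int.floordiv (n - 1) 2 := by
      rw [PySem.Int.le_floordiv_iff_mul_le (by omega)]; omega
    set m : Nat := (PySem.Int.floordiv (n - 1) 2).toNat with hmdef
    have hmc : PySem.Int.floordiv (n - 1) 2 = (m : Int) := by omega
    have hm : 1 ≤ m := by omega
    simp only [Option.map_some, hmc]
    rw [lemA t n pad m hm (fs.length + 1) fs ds acc hlen (by omega)]
    simp only [altRow, hmc]
    rw [show (2 : Int) * (m : Int) = ((2 * m : Nat) : Int) from by push_cast; ring]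
    rw [show (0 : Int) = ((0 : Nat) : Int) from rfl]
    rw [lemB t n pad (2 * m) (by omega) ((fs.zip ds).flatMap (fun fd => [fd.1, fd.2]))
        ((fs.zip ds).flatMap (fun fd => [fd.1, fd.2])).length 0 acc (by omega)]
    simp

theorem fold_eq (tlo : Option Int) (pad : Int) (htl : ∀ n, tlo = some n → 3 ≤ n) :
    ∀ (trips : List (Int × List Int × List Int)) (acc : List (List Int)),
    (∀ tr ∈ trips, tr.2.2.length = tr.2.1.length) →
    trips.foldl
      (fun acc tr =>
        rowLoopA tr.1 tr.2.1 tr.2.2 (tlo.map (fun n => PySem.Int.floordiv (n - 1) 2)) tlo pad (tr.2.1.length + 1) 0 acc)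
      acc
      = trips.foldl (fun out tr => altRow tr.1 tr.2.1 tr.2.2 tlo pad out) acc := by
  intro trips
  induction trips with
  | nil => intro acc _; rfl
  | cons tr trips ih =>
    intro acc hrows
    simp only [List.foldl_cons]
    rw [row_eq tr.1 tr.2.1 tr.2.2 tlo pad acc (hrows tr (by simp)) htl]
    exact ih _ (fun x hx => hrows x (by simp [hx]))

-- ===== VERDICT (by name: the statement is the Claim_ definition above) =====
theorem build_token_sequences_spec : Claim_equal_build_token_sequences := by
  intro tt ft dt tlo pad _hdom hpre
  obtain ⟨h1, h2, hrows, htl⟩ := hpre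
  unfold Spec_build_token_sequences build_token_sequences build_token_sequences_alt
  cases htt : tt with
  | nil => rfl
  | cons t0 tt' =>
    apply fold_eq tlo pad (htl (by simp [htt]))
    intro tr hmem
    exact (hrows tr.2 (List.of_mem_zip hmem).2).symm
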